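-- pv_equiv track=rewrite | github.com/Ruth-C552/OCR_Exploration | main_Tr.py | organize_cells_into_rows
-- ===== SOURCE A (Python) =====
-- from typing import List, Tuple, Dict
--
-- def organize_cells_into_rows(cells: List[Tuple[int, int, int, int]],
--                              tolerance: int = 20) -> List[List[Tuple[int, int, int, int]]]:
--     """Organize cells into rows based on y-coordinate"""
--     if not cells:
--         return []
--
--     rows = []
--     current_row = [cells[0]]
--     current_y = cells[0][1]
--
--     for cell in cells[1:]:
--         if abs(cell[1] - current_y) < tolerance:
--             current_row.append(cell)
--         else:
--             # Sort current row by x-coordinate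
--             current_row.sort(key=lambda c: c[0])
--             rows.append(current_row)
--             current_row = [cell]
--             current_y = cell[1]
--
--     # Add last row
--     if current_row:
--         current_row.sort(key=lambda c: c[0])
--         rows.append(current_row)
--
--     return rows
-- ===== SOURCE B (Python) =====
-- def organize_cells_into_rows(cells, tolerance=20):
--     """Two-stage: pass 1 records the start index of each row (where y leaves the
--     tolerance of the current row's first-cell y); pass 2 materializes the rows
--     by slicing between consecutive boundaries and sorting each slice by x."""
--     if not cells:
--         return []
--     boundaries = []
--     ref = cells[0][1]
--     for i, cell in enumerate(cells):
--         if i == 0 or abs(cell[1] - ref) >= tolerance: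
--             boundaries.append(i)
--             ref = cell[1]
--     boundaries.append(len(cells))
--     return [sorted(cells[s:e], key=lambda c: c[0])
--             for s, e in zip(boundaries, boundaries[1:])]
-- ===== Notes on version B (the rewrite author's own statement) =====
-- stated objective: alternative
-- what changed: Replaces A's single interleaved grow-and-sort accumulator loop by a two-stage partition: pass 1 computes the list of row-start boundary indices (resetting the reference y at each break), pass 2 slices cells between consecutive boundaries and sorts each slice by x.
import Mathlib
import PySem

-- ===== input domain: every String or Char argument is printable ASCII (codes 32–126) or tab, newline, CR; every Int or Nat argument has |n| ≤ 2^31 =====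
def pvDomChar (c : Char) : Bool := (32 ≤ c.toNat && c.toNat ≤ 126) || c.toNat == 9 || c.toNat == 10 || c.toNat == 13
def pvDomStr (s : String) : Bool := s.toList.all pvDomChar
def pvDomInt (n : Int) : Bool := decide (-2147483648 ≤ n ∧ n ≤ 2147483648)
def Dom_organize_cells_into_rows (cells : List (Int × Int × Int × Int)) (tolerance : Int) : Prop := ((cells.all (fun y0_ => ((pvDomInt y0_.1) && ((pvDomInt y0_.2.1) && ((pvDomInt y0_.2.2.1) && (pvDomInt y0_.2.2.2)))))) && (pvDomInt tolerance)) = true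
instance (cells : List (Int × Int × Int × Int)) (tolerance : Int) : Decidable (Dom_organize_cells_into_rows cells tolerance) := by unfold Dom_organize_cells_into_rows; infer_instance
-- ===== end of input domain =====

-- B replaces A's interleaved grow-and-sort accumulator loop by a two-stage partition:
-- pass 1 records row-start boundary indices, pass 2 slices between consecutive
-- boundaries and sorts each slice by x (alternative decomposition, same cost).

-- ===== PORT A =====
-- one step of A's for-loop over cells[1:]; state = (rows, current_row, current_y)
def pvAStep (tolerance : Int)
    (st : List (List (Int × Int × Int × Int)) × List (Int × Int × Int × Int) × Int)
    (cell : Int × Int × Int × Int) :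
    List (List (Int × Int × Int × Int)) × List (Int × Int × Int × Int) × Int :=
  let (rows, cur, curY) := st
  if |cell.2.1 - curY| < tolerance then
    (rows, cur ++ [cell], curY)
  else
    (rows ++ [PySem.List.sorted cur (fun c => c.1) false], [cell], cell.2.1)

def organize_cells_into_rows (cells : List (Int × Int × Int × Int)) (tolerance : Int) :
    List (List (Int × Int × Int × Int)) :=
  match cells with
  | [] => []
  | c0 :: rest =>
    let st := rest.foldl (pvAStep tolerance) ([], [c0], c0.2.1)
    -- "if current_row:" trailing flush
    if st.2.1 ≠ [] then st.1 ++ [PySem.List.sorted st.2.1 (fun c => c.1) false] else st.1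

-- ===== PORT B =====
-- pass 1 of Source B: one step of the for-loop over enumerate(cells);
-- state = (boundaries, ref); "if i == 0 or abs(cell[1] - ref) >= tolerance"
def pvBStep (tolerance : Int) (st : List Int × Int)
    (p : Int × (Int × Int × Int × Int)) : List Int × Int :=
  if p.1 = 0 ∨ tolerance ≤ |p.2.2.1 - st.2| then (st.1 ++ [p.1], p.2.2.1) else st

def organize_cells_into_rows_alt (cells : List (Int × Int × Int × Int)) (tolerance : Int) :
    List (List (Int × Int × Int × Int)) :=
  match cells with
  | [] => []
  | c0 :: _ =>
    let st := (PySem.List.enumerate cells 0).foldl (pvBStep tolerance) ([], c0.2.1)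
    let bnds := st.1 ++ [(cells.length : Int)]
    -- pass 2: [sorted(cells[s:e], key=...) for s, e in zip(boundaries, boundaries[1:])]
    (bnds.zip bnds.tail).map (fun se =>
      PySem.List.sorted (PySem.List.slice cells (some se.1) (some se.2)) (fun c => c.1) false)

-- ===== PRECONDITION & SPEC =====
def Spec_organize_cells_into_rows (cells : List (Int × Int × Int × Int)) (tolerance : Int) (out : List (List (Int × Int × Int × Int))) : Prop := out = organize_cells_into_rows_alt cells tolerance
instance (cells : List (Int × Int × Int × Int)) (tolerance : Int) (out : List (List (Int × Int × Int × Int))) : Decidable (Spec_organize_cells_into_rows cells tolerance out) := by unfold Spec_organize_cells_into_rows; infer_instance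

-- ===== CLAIM (what is proved, stated in full; the proofs are below) =====
def Claim_equal_organize_cells_into_rows : Prop := ∀ (cells : List (Int × Int × Int × Int)) (tolerance : Int), Dom_organize_cells_into_rows cells tolerance → Spec_organize_cells_into_rows cells tolerance (organize_cells_into_rows cells tolerance)

-- ===== LEMMAS AND PROOFS =====

-- common intermediate: the run decomposition (maximal within-tolerance runs, each sorted)
def pvRuns (tolerance : Int) : Nat → List (Int × Int × Int × Int) → List (List (Int × Int × Int × Int))
  | _, [] => []
  | 0, _ :: _ => []
  | Nat.succ f, c :: rest =>
    let p := fun d : Int × Int × Int × Int => decide (|d.2.1 - c.2.1| < tolerance)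
    PySem.List.sorted (c :: rest.takeWhile p) (fun x => x.1) false ::
      pvRuns tolerance f (rest.dropWhile p)

def pvRunsL (tolerance : Int) (xs : List (Int × Int × Int × Int)) : List (List (Int × Int × Int × Int)) :=
  pvRuns tolerance xs.length xs

-- A's trailing flush applied to the final loop state
def pvFinish (tolerance : Int)
    (st : List (List (Int × Int × Int × Int)) × List (Int × Int × Int × Int) × Int) :
    List (List (Int × Int × Int × Int)) :=
  if st.2.1 ≠ [] then st.1 ++ [PySem.List.sorted st.2.1 (fun c => c.1) false] else st.1

theorem pvRuns_fuel (tolerance : Int) :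
    ∀ (f g : Nat) (xs : List (Int × Int × Int × Int)),
      xs.length ≤ f → xs.length ≤ g →
      pvRuns tolerance f xs = pvRuns tolerance g xs := by
  intro f
  induction f with
  | zero =>
    intro g xs hf _
    have : xs = [] := List.length_eq_zero_iff.mp (Nat.le_zero.mp hf)
    subst this
    cases g <;> rfl
  | succ f ih =>
    intro g xs hf hg
    match xs, g with
    | [], g => cases g <;> rfl
    | c :: rest, Nat.succ g =>
      simp only [pvRuns]
      congr 1
      exact ih g _ (Nat.le_trans (List.length_dropWhile_le _ _) (Nat.le_of_succ_le_succ hf))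
        (Nat.le_trans (List.length_dropWhile_le _ _) (Nat.le_of_succ_le_succ hg))

theorem pvRunsL_cons (c : Int × Int × Int × Int) (rest : List (Int × Int × Int × Int))
    (tolerance : Int) :
    pvRunsL tolerance (c :: rest)
      = PySem.List.sorted
          (c :: rest.takeWhile (fun d => decide (|d.2.1 - c.2.1| < tolerance)))
          (fun x => x.1) false ::
        pvRunsL tolerance
          (rest.dropWhile (fun d => decide (|d.2.1 - c.2.1| < tolerance))) := by
  simp only [pvRunsL, List.length_cons, pvRuns]
  congr 1
  exact pvRuns_fuel tolerance _ _ _ (List.length_dropWhile_le _ _) (Nat.le_refl _)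

theorem pvStep_pos (tolerance : Int) (rows : List (List (Int × Int × Int × Int)))
    (cur : List (Int × Int × Int × Int)) (curY : Int) (d : Int × Int × Int × Int)
    (h : |d.2.1 - curY| < tolerance) :
    pvAStep tolerance (rows, cur, curY) d = (rows, cur ++ [d], curY) := by
  simp only [pvAStep, if_pos h]

theorem pvStep_neg (tolerance : Int) (rows : List (List (Int × Int × Int × Int)))
    (cur : List (Int × Int × Int × Int)) (curY : Int) (d : Int × Int × Int × Int)
    (h : ¬ |d.2.1 - curY| < tolerance) :
    pvAStep tolerance (rows, cur, curY) d
      = (rows ++ [PySem.List.sorted cur (fun c => c.1) false], [d], d.2.1) := by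
  simp only [pvAStep, if_neg h]

-- A's loop from a nonempty current row (whose first-cell y is curY) closes the current
-- within-tolerance run and then behaves like the run decomposition on the remaining suffix.
theorem pvA_loop (tolerance : Int) :
    ∀ (rest : List (Int × Int × Int × Int))
      (rows : List (List (Int × Int × Int × Int)))
      (cur : List (Int × Int × Int × Int)) (curY : Int), cur ≠ [] →
    pvFinish tolerance (rest.foldl (pvAStep tolerance) (rows, cur, curY))
    = rows
      ++ [PySem.List.sorted
            (cur ++ rest.takeWhile (fun d => decide (|d.2.1 - curY| < tolerance)))
            (fun c => c.1) false]
      ++ pvRunsL tolerance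
            (rest.dropWhile (fun d => decide (|d.2.1 - curY| < tolerance))) := by
  intro rest
  induction rest with
  | nil =>
    intro rows cur curY hcur
    rw [List.foldl_nil, List.takeWhile_nil, List.dropWhile_nil, List.append_nil]
    simp only [pvFinish, if_pos hcur]
    simp [pvRunsL, pvRuns]
  | cons d rest ih =>
    intro rows cur curY hcur
    rw [List.foldl_cons, List.takeWhile_cons, List.dropWhile_cons]
    by_cases h : |d.2.1 - curY| < tolerance
    · rw [pvStep_pos tolerance rows cur curY d h,
          ih rows (cur ++ [d]) curY (by simp), decide_eq_true h]
      simp [List.append_assoc]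
    · rw [pvStep_neg tolerance rows cur curY d h,
          ih (rows ++ [PySem.List.sorted cur (fun c => c.1) false]) [d] d.2.1 (by simp),
          decide_eq_false h]
      simp only [Bool.false_eq_true, if_false, List.cons_append, List.nil_append,
        List.append_assoc, List.append_nil]
      rw [pvRunsL_cons]

-- ===== B side =====

-- the boundary list produced by pass 1 from index i with reference y = ref
def pvBnds (tolerance : Int) : Int → Int → List (Int × Int × Int × Int) → List Int
  | _, _, [] => []
  | i, ref, d :: r =>
    if tolerance ≤ |d.2.1 - ref| then i :: pvBnds tolerance (i + 1) d.2.1 r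
    else pvBnds tolerance (i + 1) ref r

-- pass 2 as a function of the boundary list
def pvAsm (tolerance : Int) (cells : List (Int × Int × Int × Int)) (bnds : List Int) :
    List (List (Int × Int × Int × Int)) :=
  (bnds.zip bnds.tail).map (fun se =>
    PySem.List.sorted (PySem.List.slice cells (some se.1) (some se.2)) (fun c => c.1) false)

-- pass-1 fold from an index ≥ 1 computes acc ++ pvBnds
theorem pvBfold (tolerance : Int) :
    ∀ (rest : List (Int × Int × Int × Int)) (i : Int) (acc : List Int) (ref : Int),
      1 ≤ i →
      ((PySem.List.enumerate rest i).foldl (pvBStep tolerance) (acc, ref)).1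
        = acc ++ pvBnds tolerance i ref rest := by
  intro rest
  induction rest with
  | nil => intro i acc ref _; simp [PySem.List.enumerate_nil, pvBnds]
  | cons d r ih =>
    intro i acc ref hi
    rw [PySem.List.enumerate_cons, List.foldl_cons]
    have hne : ¬ (i = 0) := by omega
    by_cases h : tolerance ≤ |d.2.1 - ref|
    · have : pvBStep tolerance (acc, ref) (i, d) = (acc ++ [i], d.2.1) := by
        simp [pvBStep, hne, h]
      rw [this, ih (i + 1) (acc ++ [i]) d.2.1 (by omega)]
      simp [pvBnds, h, List.append_assoc]
    · have : pvBStep tolerance (acc, ref) (i, d) = (acc, ref) := by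
        simp [pvBStep, hne, h]
      rw [this, ih (i + 1) acc ref (by omega)]
      simp [pvBnds, h]

-- within-tolerance cells produce no boundary: skip them, advancing the index
theorem pvBnds_skip (tolerance : Int) :
    ∀ (t : List (Int × Int × Int × Int)) (dr : List (Int × Int × Int × Int)) (i ref : Int),
      (∀ d ∈ t, ¬ tolerance ≤ |d.2.1 - ref|) →
      pvBnds tolerance i ref (t ++ dr) = pvBnds tolerance (i + t.length) ref dr := by
  intro t
  induction t with
  | nil => intro dr i ref _; simp
  | cons d t ih =>
    intro dr i ref h
    have hd : ¬ tolerance ≤ |d.2.1 - ref| := h d (by simp)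
    simp only [List.cons_append, pvBnds, if_neg hd]
    rw [ih dr (i + 1) ref (fun e he => h e (by simp [he]))]
    congr 1
    simp only [List.length_cons]
    push_cast
    ring

-- shifting the start index shifts every boundary
theorem pvBnds_shift (tolerance : Int) :
    ∀ (xs : List (Int × Int × Int × Int)) (i ref k : Int),
      pvBnds tolerance (i + k) ref xs = (pvBnds tolerance i ref xs).map (· + k) := by
  intro xs
  induction xs with
  | nil => intro i ref k; simp [pvBnds]
  | cons d r ih =>
    intro i ref k
    by_cases h : tolerance ≤ |d.2.1 - ref|
    · simp only [pvBnds, if_pos h, List.map_cons]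
      rw [show i + k + 1 = (i + 1) + k by ring, ih]
    · simp only [pvBnds, if_neg h]
      rw [show i + k + 1 = (i + 1) + k by ring, ih]

-- every boundary is at least the start index
theorem pvBnds_ge (tolerance : Int) :
    ∀ (xs : List (Int × Int × Int × Int)) (i ref : Int) (b : Int),
      b ∈ pvBnds tolerance i ref xs → i ≤ b := by
  intro xs
  induction xs with
  | nil => intro i ref b hb; simp [pvBnds] at hb
  | cons d r ih =>
    intro i ref b hb
    by_cases h : tolerance ≤ |d.2.1 - ref|
    · simp only [pvBnds, if_pos h, List.mem_cons] at hb
      rcases hb with rfl | hb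
      · omega
      · have := ih (i + 1) d.2.1 b hb; omega
    · simp only [pvBnds, if_neg h] at hb
      have := ih (i + 1) ref b hb; omega

-- assembling two leading boundaries peels one sorted slice
theorem pvAsm_cons (tolerance : Int) (cells : List (Int × Int × Int × Int))
    (a b : Int) (l : List Int) :
    pvAsm tolerance cells (a :: b :: l)
      = PySem.List.sorted (PySem.List.slice cells (some a) (some b)) (fun c => c.1) false ::
        pvAsm tolerance cells (b :: l) := by
  simp [pvAsm]

-- shifting all boundaries by k ≥ 0 over nonnegative boundaries = dropping k cells
theorem pvAsm_shift (tolerance : Int) (cells : List (Int × Int × Int × Int)) (k : Nat)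
    (bnds : List Int) (hnn : ∀ b ∈ bnds, 0 ≤ b) :
    pvAsm tolerance cells (bnds.map (· + (k : Int)))
      = pvAsm tolerance (cells.drop k) bnds := by
  unfold pvAsm
  rw [← List.map_tail, List.zip_map, List.map_map]
  refine List.map_congr_left ?_
  intro se hse
  have h1 : 0 ≤ se.1 := hnn _ (List.of_mem_zip hse).1
  have h2 : 0 ≤ se.2 := hnn _ (List.mem_of_mem_tail (List.of_mem_zip hse).2)
  simp only [Function.comp, Prod.map]
  have e1 : (se.1 + (k : Int)).toNat = k + se.1.toNat := by omega
  have e2 : (se.2 + (k : Int)).toNat - (k + se.1.toNat)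
      = se.2.toNat - se.1.toNat := by omega
  rw [PySem.List.slice_toNat, PySem.List.slice_toNat, List.drop_drop, e1, e2]
  all_goals omega

-- main induction: assembling the boundaries of a nonempty list yields its run decomposition
theorem pvB_main (tolerance : Int) :
    ∀ (fuel : Nat) (c0 : Int × Int × Int × Int) (rest : List (Int × Int × Int × Int)),
      rest.length < fuel →
      pvAsm tolerance (c0 :: rest)
        ((0 : Int) :: (pvBnds tolerance 1 c0.2.1 rest ++ [((c0 :: rest).length : Int)]))
        = pvRunsL tolerance (c0 :: rest) := by
  intro fuel
  induction fuel with
  | zero => intro c0 rest h; exact absurd h (Nat.not_lt_zero _)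
  | succ fuel ih =>
    intro c0 rest hlt
    have hsplit : rest.takeWhile (fun d => decide (|d.2.1 - c0.2.1| < tolerance))
        ++ rest.dropWhile (fun d => decide (|d.2.1 - c0.2.1| < tolerance)) = rest :=
      List.takeWhile_append_dropWhile
    have ht : ∀ d ∈ rest.takeWhile (fun d => decide (|d.2.1 - c0.2.1| < tolerance)),
        ¬ tolerance ≤ |d.2.1 - c0.2.1| := by
      intro d hd
      have := List.mem_takeWhile_imp hd
      simp only [decide_eq_true_eq] at this
      omega
    have hbnds : pvBnds tolerance 1 c0.2.1 rest
        = pvBnds tolerance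
            (1 + ((rest.takeWhile (fun d => decide (|d.2.1 - c0.2.1| < tolerance))).length : Int))
            c0.2.1 (rest.dropWhile (fun d => decide (|d.2.1 - c0.2.1| < tolerance))) := by
      conv_lhs => rw [← hsplit]
      exact pvBnds_skip tolerance _ _ 1 c0.2.1 ht
    rw [pvRunsL_cons]
    generalize hT :
      rest.takeWhile (fun d => decide (|d.2.1 - c0.2.1| < tolerance)) = t at hbnds hsplit ⊢
    cases hdr : rest.dropWhile (fun d => decide (|d.2.1 - c0.2.1| < tolerance)) with
    | nil =>
      rw [hdr] at hbnds
      rw [hdr, List.append_nil] at hsplit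
      rw [hbnds]
      simp only [pvBnds, List.nil_append]
      rw [pvAsm_cons]
      have h2 : pvAsm tolerance (c0 :: rest) [((c0 :: rest).length : Int)] = [] := by
        simp [pvAsm]
      rw [h2]
      have h3 : PySem.List.slice (c0 :: rest) (some (0 : Int))
          (some ((c0 :: rest).length : Int)) = c0 :: rest := by
        rw [show ((0 : Int)) = ((0 : Nat) : Int) by norm_num, PySem.List.slice_natCast]
        simp
      rw [h3, hsplit]
      simp [pvRunsL, pvRuns]
    | cons d dr' =>
      have hpd : (fun d : Int × Int × Int × Int =>
          decide (|d.2.1 - c0.2.1| < tolerance)) d = false := by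
        have h2 := List.head_dropWhile_not
          (fun d : Int × Int × Int × Int => decide (|d.2.1 - c0.2.1| < tolerance))
          (l := rest) (by rw [hdr]; simp)
        simp only [hdr, List.head_cons] at h2
        exact h2
      have hge : tolerance ≤ |d.2.1 - c0.2.1| := by
        simp only [decide_eq_false_iff_not, not_lt] at hpd
        exact hpd
      rw [hdr] at hbnds hsplit
      have hlen : rest.length = t.length + 1 + dr'.length := by
        rw [← hsplit]; simp; omega
      rw [hbnds]
      simp only [pvBnds, if_pos hge]
      rw [List.cons_append, pvAsm_cons]
      -- head slice: cells[0 : 1 + len(t)] = c0 :: t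
      have hhead : PySem.List.slice (c0 :: rest) (some (0 : Int))
          (some (1 + (t.length : Int))) = c0 :: t := by
        rw [show (1 + (t.length : Int)) = (((1 + t.length : Nat)) : Int) by push_cast; ring,
            show ((0 : Int)) = ((0 : Nat) : Int) by norm_num, PySem.List.slice_natCast]
        simp only [List.drop_zero, Nat.sub_zero]
        rw [← hsplit, show (1 + t.length) = (c0 :: t).length by simp [Nat.add_comm],
            show c0 :: (t ++ d :: dr') = (c0 :: t) ++ (d :: dr') by simp,
            List.take_left]
      rw [hhead]
      congr 1
      -- remaining boundaries = boundaries of (d :: dr') shifted by 1 + len(t)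
      have hk : (1 + (t.length : Int)) :: (pvBnds tolerance (1 + (t.length : Int) + 1) d.2.1 dr'
            ++ [((c0 :: rest).length : Int)])
          = ((0 : Int) :: (pvBnds tolerance 1 d.2.1 dr' ++ [((d :: dr').length : Int)])).map
              (· + ((1 + t.length : Nat) : Int)) := by
        simp only [List.map_cons, List.map_append, List.map_cons, List.map_nil]
        have c2 : (pvBnds tolerance 1 d.2.1 dr').map (· + ((1 + t.length : Nat) : Int))
            = pvBnds tolerance (1 + (t.length : Int) + 1) d.2.1 dr' := by
          rw [← pvBnds_shift]
          congr 1
          push_cast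
          ring
        rw [c2]
        congr 1
        · push_cast; ring
        · congr 1
          congr 1
          simp only [List.length_cons, hlen]
          push_cast
          ring
      rw [hk, pvAsm_shift tolerance _ _ _ ?nonneg]
      case nonneg =>
        intro b hb
        simp only [List.mem_cons, List.mem_append, List.not_mem_nil, or_false] at hb
        rcases hb with rfl | hb | rfl
        · omega
        · have := pvBnds_ge tolerance dr' 1 d.2.1 b hb; omega
        · positivity
      have hdrop : (c0 :: rest).drop (1 + t.length) = d :: dr' := by
        rw [← hsplit, show (1 + t.length) = (c0 :: t).length by simp [Nat.add_comm],
            show c0 :: (t ++ d :: dr') = (c0 :: t) ++ (d :: dr') by simp,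
            List.drop_left]
      rw [hdrop]
      exact ih d dr' (by omega)

-- ===== VERDICT (by name: the statement is the Claim_ definition above) =====
theorem organize_cells_into_rows_spec : Claim_equal_organize_cells_into_rows := by
  unfold Claim_equal_organize_cells_into_rows
  intro cells tolerance _
  unfold Spec_organize_cells_into_rows
  match cells with
  | [] => rfl
  | c0 :: rest =>
    -- A side: the run decomposition
    have hA : organize_cells_into_rows (c0 :: rest) tolerance = pvRunsL tolerance (c0 :: rest) := by
      have h := pvA_loop tolerance rest [] [c0] c0.2.1 (by simp)
      have hL : organize_cells_into_rows (c0 :: rest) tolerance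
          = pvFinish tolerance (rest.foldl (pvAStep tolerance) ([], [c0], c0.2.1)) := rfl
      rw [hL, h, pvRunsL_cons]
      simp only [List.nil_append, List.singleton_append]
    -- B side: boundaries then slices
    have hst : ((PySem.List.enumerate (c0 :: rest) 0).foldl (pvBStep tolerance) ([], c0.2.1)).1
        = (0 : Int) :: pvBnds tolerance 1 c0.2.1 rest := by
      rw [PySem.List.enumerate_cons, List.foldl_cons]
      have h0 : pvBStep tolerance ([], c0.2.1) ((0 : Int), c0) = ([(0 : Int)], c0.2.1) := by
        simp [pvBStep]
      rw [h0, show ((0 : Int) + 1) = 1 by norm_num,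
          pvBfold tolerance rest 1 [(0 : Int)] c0.2.1 (by omega)]
      rfl
    have hB : organize_cells_into_rows_alt (c0 :: rest) tolerance
        = pvAsm tolerance (c0 :: rest)
            ((0 : Int) :: (pvBnds tolerance 1 c0.2.1 rest ++ [((c0 :: rest).length : Int)])) := by
      simp only [organize_cells_into_rows_alt, pvAsm, hst, List.cons_append]
    rw [hA, hB, pvB_main tolerance (rest.length + 1) c0 rest (by omega)]
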